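-- pv_equiv track=rewrite | github.com/AlifSrSE/ProblemSolves | 2093E-minMaxMex.py | mexx
-- ===== SOURCE A (Python) =====
-- def can_partition(x: int, a: list[int], k: int) -> bool:
--     if x == 0:
--         return True
--     count_segments = 0
--     seen = [False] * x
--     needed = x
--     for num in a:
--         if num < x and not seen[num]:
--             seen[num] = True
--             needed -= 1
--         if needed == 0:
--             count_segments += 1
--             if count_segments >= k:
--                 return True
--             seen = [False] * x
--             needed = x
--     return False
--
-- def mexx(a: list[int], k: int) -> int:
--     freq = {}
--     for num in a:
--         freq[num] = freq.get(num, 0) + 1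
--     x0 = 0
--     while True:
--         if freq.get(x0, 0) < k:
--             break
--         x0 += 1
--
--     lo = 0
--     hi = x0 + 1
--     while lo < hi:
--         mid = (lo + hi) // 2
--         if can_partition(mid, a, k):
--             lo = mid + 1
--         else:
--             hi = mid
--     return lo - 1
-- ===== SOURCE B (Python) =====
-- def can_partition(x: int, a: list[int], k: int) -> bool:
--     if x == 0:
--         return True
--     segments = 0
--     seen = set()
--     for num in a:
--         if 0 <= num < x:
--             seen.add(num)
--             if len(seen) == x:
--                 segments += 1
--                 if segments >= k:
--                     return True
--                 seen = set()
--     return False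
--
-- def mexx(a: list[int], k: int) -> int:
--     x = 0
--     while can_partition(x + 1, a, k):
--         x += 1
--     return x
-- ===== Notes on version B (the rewrite author's own statement) =====
-- stated objective: simpler
-- what changed: Dropped A's frequency dict, x0 upper-bound loop and binary search entirely: B linearly scans x = 1, 2, ... while a set-based, negative-safe can_partition holds and returns the last good x, exploiting the predicate's monotonicity sequentially instead of by halving.
-- outside the precondition, e.g. on mexx([1], 0): A does not finish within the time limit, B returns 0; on mexx([0, -1, 0, 1, 1], 2): A returns 2, B returns 1; on mexx([0, -2, 0], 2): A raises IndexError, B returns 1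
import Mathlib
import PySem

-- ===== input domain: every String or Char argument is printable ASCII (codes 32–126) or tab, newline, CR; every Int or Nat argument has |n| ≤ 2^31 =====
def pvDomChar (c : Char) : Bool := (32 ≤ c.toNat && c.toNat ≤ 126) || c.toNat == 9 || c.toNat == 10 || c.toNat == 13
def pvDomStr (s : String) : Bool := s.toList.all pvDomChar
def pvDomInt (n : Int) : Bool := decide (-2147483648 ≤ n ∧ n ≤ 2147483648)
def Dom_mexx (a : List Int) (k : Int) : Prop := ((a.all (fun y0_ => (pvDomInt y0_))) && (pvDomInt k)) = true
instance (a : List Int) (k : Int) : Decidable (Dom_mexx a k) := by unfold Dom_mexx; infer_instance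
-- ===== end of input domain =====

-- B replaces A's frequency dict / x0 upper bound / binary search by a plain linear scan of the
-- candidate mex values with a set-based can_partition (objective: simpler).

-- ===== PORT A =====

-- seen[num] read with Python's negative-index rule (hand-ported; exact when -len ≤ num, and
-- under Pre_mexx only 0 ≤ num < len is ever reached, so the `.getD false` IndexError default fires never)
def pySeenGet (seen : List Bool) (i : Int) : Bool :=
  (PySem.List.pyGet? seen i).getD false

-- seen[num] = True with Python's negative-index rule (same remark as pySeenGet)
def pySeenSet (seen : List Bool) (i : Int) : List Bool :=
  seen.set (if i < 0 then (seen.length + i).toNat else i.toNat) true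

-- the 'for num in a' loop of A's can_partition, state (count_segments, seen, needed)
def canPartitionLoopA (x k : Int) : List Int → Int → List Bool → Int → Bool
  | [], _, _, _ => false
  | num :: rest, segs, seen, needed =>
    let hit := decide (num < x) && !(pySeenGet seen num)
    let seen1 := if hit then pySeenSet seen num else seen
    let needed1 := if hit then needed - 1 else needed
    if needed1 = 0 then
      if k ≤ segs + 1 then true
      else canPartitionLoopA x k rest (segs + 1) (List.replicate x.toNat false) x
    else canPartitionLoopA x k rest segs seen1 needed1

def canPartitionA (x : Int) (a : List Int) (k : Int) : Bool :=
  if x = 0 then true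
  else canPartitionLoopA x k a 0 (List.replicate x.toNat false) x

-- 'while True: if freq.get(x0, 0) < k: break; x0 += 1' — fuel a.length + 1 suffices: the loop
-- stops at the first x0 with fewer than k occurrences, which is ≤ a.length when 1 ≤ k (Pre_mexx);
-- for k ≤ 0 the Python loop never terminates (excluded by Pre_mexx)
def x0Loop (freq : PySem.Dict Int Int) (k : Int) : Nat → Int → Int
  | 0, x0 => x0
  | fuel + 1, x0 => if freq.getD x0 0 < k then x0 else x0Loop freq k fuel (x0 + 1)

-- 'while lo < hi' — each step shrinks hi - lo by at least one, so fuel (hi - lo).toNat suffices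
def bsLoop (a : List Int) (k : Int) : Nat → Int → Int → Int
  | 0, lo, _ => lo
  | fuel + 1, lo, hi =>
    if lo < hi then
      let mid := PySem.Int.floordiv (lo + hi) 2
      if canPartitionA mid a k then bsLoop a k fuel (mid + 1) hi
      else bsLoop a k fuel lo mid
    else lo

def mexx (a : List Int) (k : Int) : Int :=
  let freq := a.foldl (fun d num => d.insert num (d.getD num 0 + 1)) PySem.Dict.empty
  let x0 := x0Loop freq k (a.length + 1) 0
  bsLoop a k (x0 + 1).toNat 0 (x0 + 1) - 1

-- ===== PORT B =====

-- the 'for num in a' loop of B's can_partition, state (segments, seen : set)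
def canPartitionLoopB (x k : Int) : List Int → Int → PySem.Set Int → Bool
  | [], _, _ => false
  | num :: rest, segs, seen =>
    if 0 ≤ num ∧ num < x then
      let seen1 := PySem.Set.add seen num
      if (seen1.length : Int) = x then
        if k ≤ segs + 1 then true
        else canPartitionLoopB x k rest (segs + 1) PySem.Set.empty
      else canPartitionLoopB x k rest segs seen1
    else canPartitionLoopB x k rest segs seen

def canPartitionB (x : Int) (a : List Int) (k : Int) : Bool :=
  if x = 0 then true else canPartitionLoopB x k a 0 PySem.Set.empty

-- 'while can_partition(x + 1, a, k): x += 1' — fuel a.length + 1 suffices: a segment needs x + 1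
-- distinct values of a, impossible once x + 1 > a.length, so the loop stops by x = a.length
def scanLoop (a : List Int) (k : Int) : Nat → Int → Int
  | 0, x => x
  | fuel + 1, x => if canPartitionB (x + 1) a k then scanLoop a k fuel (x + 1) else x

def mexx_alt (a : List Int) (k : Int) : Int := scanLoop a k (a.length + 1) 0

-- ===== PRECONDITION & SPEC =====
-- Pre_ excludes k ≤ 0, where A's x0 loop never terminates, and inputs containing a negative
-- element while 0 occurs at least k times: there A's can_partition evaluates seen[num] on a
-- negative num — an IndexError when num < -x, and otherwise an accidental wrapped slot seen[x+num].
def Pre_mexx (a : List Int) (k : Int) : Prop :=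
  1 ≤ k ∧ ((a.count 0 : Int) < k ∨ ∀ n ∈ a, 0 ≤ n)
instance (a : List Int) (k : Int) : Decidable (Pre_mexx a k) := by unfold Pre_mexx; infer_instance

def pvWitness_mexx : List Int × Int := ([0, 1, 0, 1, 2], 2)

def Spec_mexx (a : List Int) (k : Int) (out : Int) : Prop := out = mexx_alt a k
instance (a : List Int) (k : Int) (out : Int) : Decidable (Spec_mexx a k out) := by unfold Spec_mexx; infer_instance

-- ===== CLAIM (what is proved, stated in full; the proofs are below) =====
def Claim_equal_mexx : Prop := ∀ (a : List Int) (k : Int), Dom_mexx a k → Pre_mexx a k → Spec_mexx a k (mexx a k)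

-- ===== LEMMAS AND PROOFS =====

-- Proof-side functional model of one greedy pass: the number of completed segments, from an
-- abstract Finset state.
def GLoop (x : Int) : List Int → Finset Int → Nat
  | [], _ => 0
  | num :: rest, s =>
    if 0 ≤ num ∧ num < x then
      if ((insert num s).card : Int) = x then GLoop x rest ∅ + 1
      else GLoop x rest (insert num s)
    else GLoop x rest s

-- ---- generic Finset facts ----
lemma card_le_of_subset_Ico (x : Int) (hx : 0 ≤ x) (f : Finset Int) (hf : f ⊆ Finset.Ico 0 x) :
    (f.card : Int) ≤ x := by
  have h1 := Finset.card_le_card hf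
  have h2 : (Finset.Ico (0:Int) x).card = (x - 0).toNat := Int.card_Ico 0 x
  rw [h2] at h1
  omega

lemma full_of_card_eq (x : Int) (f : Finset Int) (hf : f ⊆ Finset.Ico 0 x) (hc : (f.card : Int) = x) :
    f = Finset.Ico 0 x := by
  apply Finset.eq_of_subset_of_card_le hf
  have h2 : (Finset.Ico (0:Int) x).card = (x - 0).toNat := Int.card_Ico 0 x
  omega

lemma insert_subset_Ico (x num : Int) (f : Finset Int) (hf : f ⊆ Finset.Ico 0 x)
    (h0 : 0 ≤ num) (h1 : num < x) : insert num f ⊆ Finset.Ico 0 x := by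
  intro y hy
  rcases Finset.mem_insert.1 hy with h | h
  · subst h; exact Finset.mem_Ico.2 ⟨h0, h1⟩
  · exact hf h

-- ---- PySem.Set bookkeeping for B's seen set ----
lemma length_add (s : PySem.Set Int) (num : Int) (hnd : s.Nodup) :
    ((PySem.Set.add s num).length : Int) = ((insert num s.toFinset).card : Int) := by
  by_cases h : num ∈ s
  · rw [PySem.Set.add_of_mem h, Finset.insert_eq_self.2 (List.mem_toFinset.2 h),
      List.toFinset_card_of_nodup hnd]
  · rw [PySem.Set.add_of_not_mem h,
      Finset.card_insert_of_notMem (fun hc => h (List.mem_toFinset.1 hc)),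
      List.toFinset_card_of_nodup hnd]
    simp

lemma toFinset_add (s : PySem.Set Int) (num : Int) :
    (PySem.Set.add s num).toFinset = insert num s.toFinset := by
  by_cases h : num ∈ s
  · rw [PySem.Set.add_of_mem h, Finset.insert_eq_self.2 (List.mem_toFinset.2 h)]
  · rw [PySem.Set.add_of_not_mem h]; simp [List.toFinset_append]

lemma nodup_add (s : PySem.Set Int) (num : Int) (hnd : s.Nodup) :
    (PySem.Set.add s num).Nodup := by
  by_cases h : num ∈ s
  · rw [PySem.Set.add_of_mem h]; exact hnd
  · rw [PySem.Set.add_of_not_mem h]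
    simp [List.nodup_append, hnd]
    exact fun a ha h2 => h (h2 ▸ ha)

-- ---- B's loop computes the greedy segment count ----
lemma canB_char (x k : Int) :
    ∀ (a : List Int) (segs : Int) (s : PySem.Set Int), s.Nodup → segs < k →
      (canPartitionLoopB x k a segs s = true ↔ k ≤ segs + (GLoop x a s.toFinset : Int)) := by
  intro a
  induction a with
  | nil =>
    intro segs s hnd hseg
    simp [canPartitionLoopB, GLoop]; omega
  | cons num rest ih =>
    intro segs s hnd hseg
    rw [canPartitionLoopB, GLoop]
    dsimp only
    by_cases hin : 0 ≤ num ∧ num < x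
    · rw [if_pos hin, if_pos hin]
      rw [show ((PySem.Set.add s num).length : Int) = (((insert num s.toFinset).card : Nat) : Int)
          from length_add s num hnd]
      by_cases hcomp : (((insert num s.toFinset).card : Nat) : Int) = x
      · rw [if_pos hcomp, if_pos hcomp]
        by_cases hk1 : k ≤ segs + 1
        · rw [if_pos hk1]
          simp only [true_iff]
          push_cast
          omega
        · rw [if_neg hk1]
          rw [ih (segs + 1) PySem.Set.empty (by simp [PySem.Set.empty]) (by omega)]
          have : (PySem.Set.empty : PySem.Set Int).toFinset = (∅ : Finset Int) := rfl
          rw [this]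
          push_cast
          omega
      · rw [if_neg hcomp, if_neg hcomp]
        rw [ih segs (PySem.Set.add s num) (nodup_add s num hnd) hseg, toFinset_add]
    · rw [if_neg hin, if_neg hin]
      exact ih segs s hnd hseg

-- ---- A's seen-list is the characteristic vector of the Finset state ----
def encode (x : Int) (f : Finset Int) : List Bool :=
  (List.range x.toNat).map (fun i => decide (Int.ofNat i ∈ f))

lemma encode_empty (x : Int) : encode x ∅ = List.replicate x.toNat false := by
  simp [encode, List.map_const']

lemma encode_length (x : Int) (f : Finset Int) : (encode x f).length = x.toNat := by
  simp [encode]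

lemma encode_getElem? (x : Int) (f : Finset Int) (j : Nat) (hj : j < x.toNat) :
    (encode x f)[j]? = some (decide ((j : Int) ∈ f)) := by
  rw [encode, List.getElem?_map, List.getElem?_range hj, Option.map_some]
  simp

lemma pySeenGet_encode (x : Int) (f : Finset Int) (num : Int) (h0 : 0 ≤ num) (h1 : num < x) :
    pySeenGet (encode x f) num = decide (num ∈ f) := by
  have hlt : num.toNat < x.toNat := by omega
  rw [pySeenGet, PySem.List.pyGet?, PySem.List.pyIdx?, if_pos h0,
    if_pos (by rw [encode_length]; omega)]
  simp [encode_getElem? x f num.toNat hlt, Int.toNat_of_nonneg h0]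

lemma pySeenSet_encode (x : Int) (f : Finset Int) (num : Int) (h0 : 0 ≤ num) (h1 : num < x) :
    pySeenSet (encode x f) num = encode x (insert num f) := by
  have hni : ¬ (num < 0) := by omega
  apply List.ext_getElem?
  intro j
  by_cases hj : j < x.toNat
  · have hlen : num.toNat < (encode x f).length := by rw [encode_length]; omega
    rw [pySeenSet, if_neg hni, List.getElem?_set, encode_getElem? x _ j hj]
    by_cases he : num.toNat = j
    · subst he
      rw [encode_getElem? x (insert num f) num.toNat hj]
      simp [hlen, Int.toNat_of_nonneg h0]
    · have hne : ((j : Int)) ≠ num := by omega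
      rw [if_neg he, encode_getElem? x (insert num f) j hj]
      simp [Finset.mem_insert, hne]
  · rw [List.getElem?_eq_none (by rw [pySeenSet, if_neg hni, List.length_set, encode_length]; omega),
      List.getElem?_eq_none (by rw [encode_length]; omega)]

-- ---- A's loop computes the same greedy segment count (on nonnegative input) ----
lemma canA_char (x k : Int) (hx : 1 ≤ x) :
    ∀ (a : List Int), (∀ n ∈ a, 0 ≤ n) →
    ∀ (segs : ℤ) (f : Finset Int), f ⊆ Finset.Ico 0 x → (f.card : Int) < x → segs < k →
      (canPartitionLoopA x k a segs (encode x f) (x - f.card) = true ↔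
        k ≤ segs + (GLoop x a f : Int)) := by
  intro a
  induction a with
  | nil =>
    intro _ segs f hsub hcard hseg
    simp [canPartitionLoopA, GLoop]; omega
  | cons num rest ih =>
    intro hnn segs f hsub hcard hseg
    have hnum : 0 ≤ num := hnn num (by simp)
    have hnnr : ∀ n ∈ rest, 0 ≤ n := fun n hn => hnn n (by simp [hn])
    rw [canPartitionLoopA, GLoop]
    by_cases hlt : num < x
    · have hP : 0 ≤ num ∧ num < x := ⟨hnum, hlt⟩
      rw [if_pos hP]
      by_cases hmem : num ∈ f
      · -- already seen: no hit on A's side, no growth on the model side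
        have hhit : (decide (num < x) && !(pySeenGet (encode x f) num)) = false := by
          rw [pySeenGet_encode x f num hnum hlt]; simp [hmem]
        rw [hhit]
        simp only [Bool.false_eq_true, if_false]
        rw [if_neg (by omega : ¬ (x - (f.card : Int) = 0))]
        rw [Finset.insert_eq_self.2 hmem]
        rw [if_neg (by omega : ¬ ((f.card : Int) = x))]
        exact ih hnnr segs f hsub hcard hseg
      · -- hit
        have hhit : (decide (num < x) && !(pySeenGet (encode x f) num)) = true := by
          rw [pySeenGet_encode x f num hnum hlt]; simp [hlt, hmem]
        rw [hhit]
        simp only [if_true]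
        rw [pySeenSet_encode x f num hnum hlt]
        have hcard1 : ((insert num f).card : Int) = (f.card : Int) + 1 := by
          rw [Finset.card_insert_of_notMem hmem]; push_cast; ring
        have hsub1 : insert num f ⊆ Finset.Ico 0 x := insert_subset_Ico x num f hsub hnum hlt
        by_cases hfull : x - (f.card : Int) - 1 = 0
        · rw [if_pos (by omega : x - (f.card : Int) - 1 = 0)]
          rw [if_pos (by omega : ((insert num f).card : Int) = x)]
          by_cases hk1 : k ≤ segs + 1
          · rw [if_pos hk1]
            simp only [true_iff]
            push_cast
            omega
          · rw [if_neg hk1]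
            rw [← encode_empty x]
            rw [show (canPartitionLoopA x k rest (segs+1) (encode x ∅) x)
                = (canPartitionLoopA x k rest (segs+1) (encode x ∅) (x - ((∅ : Finset Int).card : Int))) by norm_num]
            rw [ih hnnr (segs + 1) ∅ (by simp) (by simp; omega) (by omega)]
            push_cast
            omega
        · rw [if_neg (by omega : ¬ (x - (f.card : Int) - 1 = 0))]
          rw [if_neg (by omega : ¬ (((insert num f).card : Int) = x))]
          have hclt : ((insert num f).card : Int) < x := by
            have := card_le_of_subset_Ico x (by omega) _ hsub1
            omega
          have := ih hnnr segs (insert num f) hsub1 hclt hseg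
          rw [show x - (f.card : Int) - 1 = x - ((insert num f).card : Int) by omega]
          exact this
    · -- num ≥ x: no hit, skipped on both sides
      have hhit : (decide (num < x) && !(pySeenGet (encode x f) num)) = false := by simp [hlt]
      rw [hhit]
      simp only [Bool.false_eq_true, if_false]
      rw [if_neg (by omega : ¬ (x - (f.card : Int) = 0))]
      rw [if_neg (fun h => hlt h.2)]
      exact ih hnnr segs f hsub hcard hseg

-- ---- the two predicates agree on nonnegative input ----
lemma canAB (a : List Int) (k : Int) (hk : 0 < k) (hnn : ∀ n ∈ a, 0 ≤ n) (x : Int) (hx : 0 ≤ x) :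
    canPartitionA x a k = canPartitionB x a k := by
  by_cases h0 : x = 0
  · simp [canPartitionA, canPartitionB, h0]
  · have hx1 : 1 ≤ x := by omega
    rw [canPartitionA, canPartitionB, if_neg h0, if_neg h0]
    have hA := canA_char x k hx1 a hnn 0 ∅ (by simp) (by simp; omega) (by omega)
    rw [encode_empty x] at hA
    rw [show x - ((∅ : Finset Int).card : Int) = x by simp] at hA
    have hB := canB_char x k a 0 PySem.Set.empty (by simp [PySem.Set.empty]) (by omega)
    have hE : (PySem.Set.empty : PySem.Set Int).toFinset = (∅ : Finset Int) := rfl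
    rw [hE] at hB
    exact Bool.eq_iff_iff.2 (hA.trans hB.symm)

-- ---- monotonicity of the greedy count in x ----
lemma GLoop_anti : ∀ (a : List Int) (x x' : Int), 1 ≤ x' → x' ≤ x →
    ∀ (s s' : Finset Int), s ⊆ Finset.Ico 0 x → s' ⊆ Finset.Ico 0 x' → (s'.card : Int) < x' →
      ((s ∩ Finset.Ico 0 x' ⊆ s' → GLoop x a s ≤ GLoop x' a s') ∧
        GLoop x a s ≤ GLoop x' a s' + 1) := by
  intro a
  induction a with
  | nil => intro x x' hx' hxx s s' hs hs' hc; simp [GLoop]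
  | cons num rest ih =>
    intro x x' hx' hxx s s' hs hs' hc
    rw [GLoop, GLoop]
    by_cases hin : 0 ≤ num ∧ num < x
    · rw [if_pos hin]
      by_cases hin' : 0 ≤ num ∧ num < x'
      · rw [if_pos hin']
        have hsub1 := insert_subset_Ico x num s hs hin.1 hin.2
        have hsub1' := insert_subset_Ico x' num s' hs' hin'.1 hin'.2
        have hcins' : ((insert num s').card : Int) ≤ x' := card_le_of_subset_Ico x' (by omega) _ hsub1'
        by_cases hcomp : ((insert num s).card : Int) = x
        · -- x-side completes
          have hfullx : insert num s = Finset.Ico 0 x := full_of_card_eq x _ hsub1 hcomp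
          rw [if_pos hcomp]
          constructor
          · intro hsubrel
            -- the x'-side must complete too
            have hfull' : ((insert num s').card : Int) = x' := by
              have hsup : Finset.Ico 0 x' ⊆ insert num s' := by
                intro y hy
                have hyx : y ∈ insert num s := by
                  rw [hfullx]
                  have := Finset.mem_Ico.1 hy
                  exact Finset.mem_Ico.2 ⟨this.1, by omega⟩
                rcases Finset.mem_insert.1 hyx with h | h
                · subst h; exact Finset.mem_insert_self _ _
                · exact Finset.mem_insert_of_mem (hsubrel (Finset.mem_inter.2 ⟨h, hy⟩))
              have : insert num s' = Finset.Ico 0 x' :=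
                Finset.Subset.antisymm hsub1' hsup
              rw [this]
              have h2 : (Finset.Ico (0:Int) x').card = (x' - 0).toNat := Int.card_Ico 0 x'
              omega
            rw [if_pos hfull']
            have := (ih x x' hx' hxx ∅ ∅ (by simp) (by simp) (by simp; omega)).1 (by simp)
            omega
          · -- slack form
            by_cases hcomp' : ((insert num s').card : Int) = x'
            · rw [if_pos hcomp']
              have := (ih x x' hx' hxx ∅ ∅ (by simp) (by simp) (by simp; omega)).1 (by simp)
              omega
            · rw [if_neg hcomp']
              have := (ih x x' hx' hxx ∅ (insert num s') (by simp) hsub1' (by omega)).1 (by simp)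
              omega
        · -- x-side does not complete
          rw [if_neg hcomp]
          have hcins : ((insert num s).card : Int) < x := by
            have := card_le_of_subset_Ico x (by omega) _ hsub1
            omega
          by_cases hcomp' : ((insert num s').card : Int) = x'
          · rw [if_pos hcomp']
            have h2 := (ih x x' hx' hxx (insert num s) ∅ hsub1 (by simp) (by simp; omega)).2
            constructor
            · intro _; omega
            · omega
          · rw [if_neg hcomp']
            have hrec := ih x x' hx' hxx (insert num s) (insert num s') hsub1 hsub1' (by omega)
            constructor
            · intro hsubrel
              apply hrec.1
              intro y hy
              have := Finset.mem_inter.1 hy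
              rcases Finset.mem_insert.1 this.1 with h | h
              · subst h; exact Finset.mem_insert_self _ _
              · exact Finset.mem_insert_of_mem (hsubrel (Finset.mem_inter.2 ⟨h, this.2⟩))
            · exact hrec.2
      · -- in range for x but not for x' (so x' ≤ num < x)
        rw [if_neg hin']
        have hnum' : x' ≤ num := by
          rcases hin with ⟨h0, _⟩; by_contra hcon; exact hin' ⟨h0, by omega⟩
        have hsub1 := insert_subset_Ico x num s hs hin.1 hin.2
        by_cases hcomp : ((insert num s).card : Int) = x
        · rw [if_pos hcomp]
          have hfullx : insert num s = Finset.Ico 0 x := full_of_card_eq x _ hsub1 hcomp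
          constructor
          · intro hsubrel
            -- then s' would already be full, contradicting hc
            exfalso
            have hsup : Finset.Ico 0 x' ⊆ s' := by
              intro y hy
              have hym := Finset.mem_Ico.1 hy
              have hyx : y ∈ insert num s := by
                rw [hfullx]; exact Finset.mem_Ico.2 ⟨hym.1, by omega⟩
              rcases Finset.mem_insert.1 hyx with h | h
              · subst h; omega
              · exact hsubrel (Finset.mem_inter.2 ⟨h, hy⟩)
            have h1 := Finset.card_le_card hsup
            have h2 : (Finset.Ico (0:Int) x').card = (x' - 0).toNat := Int.card_Ico 0 x'
            omega
          · have := (ih x x' hx' hxx ∅ s' (by simp) hs' hc).1 (by simp)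
            omega
        · rw [if_neg hcomp]
          have hrec := ih x x' hx' hxx (insert num s) s' hsub1 hs' hc
          constructor
          · intro hsubrel
            apply hrec.1
            intro y hy
            have := Finset.mem_inter.1 hy
            rcases Finset.mem_insert.1 this.1 with h | h
            · subst h; exfalso; have := Finset.mem_Ico.1 this.2; omega
            · exact hsubrel (Finset.mem_inter.2 ⟨h, this.2⟩)
          · exact hrec.2
    · -- out of range for x, hence for x' as well
      rw [if_neg hin]
      have hin' : ¬ (0 ≤ num ∧ num < x') := by
        intro h; exact hin ⟨h.1, by omega⟩
      rw [if_neg hin']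
      exact ih x x' hx' hxx s s' hs hs' hc

-- ---- upper bounds on the greedy count ----
lemma GLoop_le_count (x y : Int) (h0 : 0 ≤ y) (h1 : y < x) :
    ∀ (a : List Int) (s : Finset Int), s ⊆ Finset.Ico 0 x →
      (GLoop x a s : Int) ≤ a.count y + (if y ∈ s then 1 else 0) := by
  intro a
  induction a with
  | nil =>
    intro s hs
    simp only [GLoop, List.count_nil, CharP.cast_eq_zero, zero_add]
    split_ifs <;> omega
  | cons num rest ih =>
    intro s hs
    rw [GLoop]
    by_cases hin : 0 ≤ num ∧ num < x
    · rw [if_pos hin]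
      have hsub1 := insert_subset_Ico x num s hs hin.1 hin.2
      by_cases hcomp : ((insert num s).card : Int) = x
      · rw [if_pos hcomp]
        have hfull : insert num s = Finset.Ico 0 x := full_of_card_eq x _ hsub1 hcomp
        have hymem : y ∈ insert num s := by rw [hfull]; exact Finset.mem_Ico.2 ⟨h0, h1⟩
        have hih := ih ∅ (by simp)
        rw [if_neg (Finset.notMem_empty y)] at hih
        rw [List.count_cons]
        push_cast at hih ⊢
        rcases Finset.mem_insert.1 hymem with h | h
        · rw [if_pos (by exact beq_iff_eq.2 h.symm)]
          split_ifs <;> omega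
        · rw [if_pos h]
          split_ifs <;> omega
      · rw [if_neg hcomp]
        have hih := ih (insert num s) hsub1
        rw [List.count_cons]
        push_cast at hih ⊢
        by_cases hyn : y = num
        · rw [if_pos (Finset.mem_insert.2 (Or.inl hyn))] at hih
          rw [if_pos (by exact beq_iff_eq.2 hyn.symm)]
          split_ifs <;> omega
        · have hmm : (y ∈ insert num s) ↔ y ∈ s := by simp [Finset.mem_insert, hyn]
          rw [if_congr hmm rfl rfl] at hih
          rw [if_neg (by simp only [beq_iff_eq]; exact fun hc => hyn hc.symm)]
          split_ifs at hih ⊢ <;> omega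
    · rw [if_neg hin]
      have hyn : y ≠ num := by
        intro h; subst h; exact hin ⟨h0, h1⟩
      have hih := ih s hs
      rw [List.count_cons]
      push_cast at hih ⊢
      rw [if_neg (by simp only [beq_iff_eq]; exact fun hc => hyn hc.symm)]
      split_ifs at hih ⊢ <;> omega

lemma GLoop_eq_zero (x : Int) :
    ∀ (a : List Int) (s : Finset Int), (a.length : Int) + s.card < x → GLoop x a s = 0 := by
  intro a
  induction a with
  | nil => intro s _; simp [GLoop]
  | cons num rest ih =>
    intro s hlen
    simp only [List.length_cons] at hlen
    rw [GLoop]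
    have hci : ((insert num s).card : Int) ≤ (s.card : Int) + 1 := by
      have := Finset.card_insert_le num s
      omega
    by_cases hin : 0 ≤ num ∧ num < x
    · rw [if_pos hin]
      rw [if_neg (by push_cast at hlen ⊢; omega : ¬ ((insert num s).card : Int) = x)]
      exact ih (insert num s) (by push_cast at hlen ⊢; omega)
    · rw [if_neg hin]
      exact ih s (by push_cast at hlen ⊢; omega)

-- ---- the common answer specification; it pins the result down uniquely ----
def IsAns (a : List Int) (k : Int) (r : Int) : Prop :=
  0 ≤ r ∧ (∀ y, 0 ≤ y → y ≤ r → canPartitionB y a k = true) ∧ canPartitionB (r + 1) a k = false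

lemma IsAns_unique (a : List Int) (k : Int) (r1 r2 : Int) (h1 : IsAns a k r1) (h2 : IsAns a k r2) :
    r1 = r2 := by
  rcases h1 with ⟨hr1, hall1, hf1⟩
  rcases h2 with ⟨hr2, hall2, hf2⟩
  by_contra hne
  rcases lt_or_gt_of_ne hne with h | h
  · exact absurd (hall2 (r1 + 1) (by omega) (by omega)) (by simp [hf1])
  · exact absurd (hall1 (r2 + 1) (by omega) (by omega)) (by simp [hf2])

-- ---- B's scan satisfies the specification ----
lemma canB_zero (a : List Int) (k : Int) : canPartitionB 0 a k = true := by
  simp [canPartitionB]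

lemma scan_isAns (a : List Int) (k : Int) :
    ∀ (fuel : Nat) (x : Int), 0 ≤ x →
      (∀ y, 0 ≤ y → y ≤ x → canPartitionB y a k = true) →
      (∃ j : Nat, j < fuel ∧ canPartitionB (x + j + 1) a k = false) →
      IsAns a k (scanLoop a k fuel x) := by
  intro fuel
  induction fuel with
  | zero =>
    intro x _ _ hex
    exact absurd hex (by simp)
  | succ fuel ih =>
    intro x hx hall hex
    rw [scanLoop]
    by_cases hstep : canPartitionB (x + 1) a k = true
    · rw [if_pos hstep]
      apply ih (x + 1) (by omega)
      · intro y hy0 hy1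
        by_cases hcase : y ≤ x
        · exact hall y hy0 hcase
        · rw [show y = x + 1 by omega]; exact hstep
      · rcases hex with ⟨j, hj, hfalse⟩
        have hj0 : j ≠ 0 := by
          intro h; subst h
          rw [show x + ((0 : Nat) : Int) + 1 = x + 1 by norm_num, hstep] at hfalse
          exact absurd hfalse (by simp)
        exact ⟨j - 1, by omega, by rw [show x + 1 + ((j - 1 : Nat) : Int) + 1 = x + j + 1 by omega]; exact hfalse⟩
    · rw [if_neg hstep]
      refine ⟨hx, hall, ?_⟩
      cases hb : canPartitionB (x + 1) a k with
      | false => rfl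
      | true => exact absurd hb hstep

-- ---- downward closure of B's predicate, via monotonicity of the greedy count ----
lemma canB_dc (a : List Int) (k : Int) (hk : 0 < k) (u v : Int) (h0 : 0 ≤ u) (huv : u ≤ v)
    (hv : canPartitionB v a k = true) : canPartitionB u a k = true := by
  by_cases hu0 : u = 0
  · subst hu0; exact canB_zero a k
  · have hu1 : 1 ≤ u := by omega
    have hv1 : 1 ≤ v := by omega
    rw [canPartitionB, if_neg (by omega : ¬ (v = 0))] at hv
    rw [canPartitionB, if_neg (by omega : ¬ (u = 0))]
    have hE : (PySem.Set.empty : PySem.Set Int).toFinset = (∅ : Finset Int) := rfl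
    have hB := canB_char v k a 0 PySem.Set.empty (by simp [PySem.Set.empty]) (by omega)
    rw [hE] at hB
    have hBv := hB.1 hv
    have hmono := (GLoop_anti a v u hu1 huv ∅ ∅ (by simp) (by simp) (by simp; omega)).1 (by simp)
    have hB' := canB_char u k a 0 PySem.Set.empty (by simp [PySem.Set.empty]) (by omega)
    rw [hE] at hB'
    apply hB'.2
    have : (GLoop v a ∅ : Int) ≤ (GLoop u a ∅ : Int) := by exact_mod_cast hmono
    omega

-- ---- A's binary search satisfies the same specification ----
lemma bs_isAns (a : List Int) (k : Int) (hk : 0 < k) (hnn : ∀ n ∈ a, 0 ≤ n) :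
    ∀ (fuel : Nat) (lo hi : Int), 0 ≤ lo → lo ≤ hi → hi - lo ≤ fuel →
      (∀ y, 0 ≤ y → y < lo → canPartitionB y a k = true) →
      canPartitionB hi a k = false →
      IsAns a k (bsLoop a k fuel lo hi - 1) := by
  intro fuel
  induction fuel with
  | zero =>
    intro lo hi hlo hlh hfuel hall hhi
    have hle : lo = hi := by omega
    subst hle
    rw [bsLoop]
    have hlo1 : 1 ≤ lo := by
      by_contra hcon
      have : lo = 0 := by omega
      rw [this] at hhi
      exact absurd (canB_zero a k) (by simp [hhi])
    exact ⟨by omega, fun y hy0 hy1 => hall y hy0 (by omega), by rw [show lo - 1 + 1 = lo by omega]; exact hhi⟩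
  | succ fuel ih =>
    intro lo hi hlo hlh hfuel hall hhi
    rw [bsLoop]
    by_cases hlt : lo < hi
    · rw [if_pos hlt]
      dsimp only
      have hmid1 : lo ≤ PySem.Int.floordiv (lo + hi) 2 :=
        (PySem.Int.floordiv_two_mid_bounds (by omega)).1
      have hmid2 : PySem.Int.floordiv (lo + hi) 2 < hi := by
        rw [PySem.Int.floordiv_lt_iff_lt_mul (by omega)]; omega
      rw [canAB a k hk hnn _ (by omega)]
      by_cases hmid : canPartitionB (PySem.Int.floordiv (lo + hi) 2) a k = true
      · rw [if_pos hmid]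
        apply ih _ hi (by omega) (by omega) (by omega) _ hhi
        intro y hy0 hy1
        exact canB_dc a k hk y _ hy0 (by omega) hmid
      · rw [if_neg hmid]
        apply ih lo _ hlo (by omega) (by omega) hall
        cases hb : canPartitionB (PySem.Int.floordiv (lo + hi) 2) a k with
        | false => rfl
        | true => exact absurd hb hmid
    · rw [if_neg hlt]
      have hle : lo = hi := by omega
      subst hle
      have hlo1 : 1 ≤ lo := by
        by_contra hcon
        have : lo = 0 := by omega
        rw [this] at hhi
        exact absurd (canB_zero a k) (by simp [hhi])
      exact ⟨by omega, fun y hy0 hy1 => hall y hy0 (by omega), by rw [show lo - 1 + 1 = lo by omega]; exact hhi⟩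

-- ---- the frequency dict is a counter ----
lemma freq_getD (a : List Int) (v : Int) :
    (a.foldl (fun d num => d.insert num (d.getD num 0 + 1)) PySem.Dict.empty).getD v 0
      = (a.count v : Int) := by
  rw [PySem.Dict.getD_foldl_insert_add_one]; simp

lemma x0Loop_spec (a : List Int) (k : Int) :
    ∀ (fuel : Nat) (x0 : Int),
      (∃ j : Nat, j < fuel ∧ (a.count (x0 + j) : Int) < k) →
      x0 ≤ x0Loop (a.foldl (fun d num => d.insert num (d.getD num 0 + 1)) PySem.Dict.empty) k fuel x0 ∧
      (a.count (x0Loop (a.foldl (fun d num => d.insert num (d.getD num 0 + 1)) PySem.Dict.empty) k fuel x0) : Int) < k := by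
  intro fuel
  induction fuel with
  | zero =>
    intro x0 hex
    exact absurd hex (by simp)
  | succ fuel ih =>
    intro x0 hex
    rw [x0Loop]
    rw [freq_getD a x0]
    by_cases hstop : (a.count x0 : Int) < k
    · rw [if_pos hstop]
      exact ⟨le_refl x0, hstop⟩
    · rw [if_neg hstop]
      have := ih (x0 + 1) (by
        rcases hex with ⟨j, hj, hcount⟩
        have hj0 : j ≠ 0 := by
          intro h; subst h
          rw [show x0 + ((0 : Nat) : Int) = x0 by norm_num] at hcount
          exact hstop hcount
        exact ⟨j - 1, by omega, by rw [show x0 + 1 + (j - 1 : Nat) = x0 + j by omega]; exact hcount⟩)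
      exact ⟨by omega, this.2⟩

lemma pigeonhole (a : List Int) (k : Int) (hk : 0 < k) :
    ∃ j : Nat, j < a.length + 1 ∧ (a.count ((j : Nat) : Int) : Int) < k := by
  by_contra hcon
  push Not at hcon
  have hmem : ∀ j : Nat, j ≤ a.length → ((j : Int) ∈ a) := by
    intro j hj
    have := hcon j (by omega)
    have hpos : 0 < a.count ((j : Nat) : Int) := by omega
    exact List.count_pos_iff.1 hpos
  have hsub : (Finset.Ico (0 : Int) (a.length + 1)) ⊆ a.toFinset := by
    intro y hy
    have hym := Finset.mem_Ico.1 hy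
    have hy0 : y = ((y.toNat : Nat) : Int) := by omega
    rw [List.mem_toFinset, hy0]
    exact hmem y.toNat (by omega)
  have h1 := Finset.card_le_card hsub
  have h2 : (Finset.Ico (0:Int) (a.length + 1)).card = ((a.length : Int) + 1 - 0).toNat :=
    Int.card_Ico 0 (a.length + 1)
  have h3 := a.toFinset_card_le
  omega

-- ===== VERDICT (by name: the statement is the Claim_ definition above) =====
theorem mexx_spec : Claim_equal_mexx := by
  intro a k _ hpre
  rcases hpre with ⟨hk1, hpre⟩
  have hk : 0 < k := by omega
  unfold Spec_mexx
  by_cases hnn : ∀ n ∈ a, 0 ≤ n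
  · -- all elements nonnegative: both programs compute the unique IsAns value
    -- the x0 loop result
    obtain ⟨j0, hj0, hj0count⟩ := pigeonhole a k hk
    have hx0 := x0Loop_spec a k (a.length + 1) 0 ⟨j0, hj0, by rw [show (0 : Int) + j0 = (j0 : Int) by omega]; exact hj0count⟩
    set x0 := x0Loop (a.foldl (fun d num => d.insert num (d.getD num 0 + 1)) PySem.Dict.empty) k (a.length + 1) 0 with hx0def
    -- ¬P (x0 + 1)
    have hPx0 : canPartitionB (x0 + 1) a k = false := by
      rw [canPartitionB, if_neg (by omega : ¬ (x0 + 1 = 0))]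
      have hE : (PySem.Set.empty : PySem.Set Int).toFinset = (∅ : Finset Int) := rfl
      have hB := canB_char (x0 + 1) k a 0 PySem.Set.empty (by simp [PySem.Set.empty]) (by omega)
      rw [hE] at hB
      have hle := GLoop_le_count (x0 + 1) x0 (by omega) (by omega) a ∅ (by simp)
      rw [if_neg (Finset.notMem_empty x0)] at hle
      cases hb : canPartitionLoopB (x0 + 1) k a 0 PySem.Set.empty with
      | false => rfl
      | true => have := hB.1 hb; omega
    -- A computes an IsAns value
    have hA : IsAns a k (mexx a k) := by
      rw [mexx]
      exact bs_isAns a k hk hnn (x0 + 1).toNat 0 (x0 + 1) (by omega) (by omega)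
        (by omega) (by intro y hy0 hy1; omega) hPx0
    -- B computes an IsAns value
    have hPlen : canPartitionB ((a.length : Int) + 1) a k = false := by
      rw [canPartitionB, if_neg (by omega : ¬ ((a.length : Int) + 1 = 0))]
      have hE : (PySem.Set.empty : PySem.Set Int).toFinset = (∅ : Finset Int) := rfl
      have hB := canB_char ((a.length : Int) + 1) k a 0 PySem.Set.empty (by simp [PySem.Set.empty]) (by omega)
      rw [hE] at hB
      have hz := GLoop_eq_zero ((a.length : Int) + 1) a ∅ (by simp)
      cases hb : canPartitionLoopB ((a.length : Int) + 1) k a 0 PySem.Set.empty with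
      | false => rfl
      | true =>
        have := hB.1 hb
        rw [hz] at this
        simp at this
        omega
    have hBans : IsAns a k (mexx_alt a k) := by
      rw [mexx_alt]
      apply scan_isAns a k (a.length + 1) 0 (by omega)
      · intro y hy0 hy1
        rw [show y = 0 by omega]
        exact canB_zero a k
      · exact ⟨a.length, by omega, by rw [show (0 : Int) + a.length + 1 = (a.length : Int) + 1 by omega]; exact hPlen⟩
    exact IsAns_unique a k (mexx a k) (mexx_alt a k) hA hBans
  · -- some element is negative: then count 0 < k, A's search collapses to [0, 1)
    have hcount : (a.count 0 : Int) < k := by tauto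
    -- A's side
    have hx0 : x0Loop (a.foldl (fun d num => d.insert num (d.getD num 0 + 1)) PySem.Dict.empty) k (a.length + 1) 0 = 0 := by
      rw [show a.length + 1 = a.length + 1 by rfl, x0Loop, freq_getD a 0, if_pos hcount]
    have hAval : mexx a k = 0 := by
      simp only [mexx, hx0]
      have h1 : ((0 : Int) + 1).toNat = 0 + 1 := rfl
      rw [h1, bsLoop]
      dsimp only
      rw [if_pos (by omega : (0:Int) < 0 + 1)]
      have hmid : PySem.Int.floordiv (0 + (0 + 1)) 2 = 0 := by decide
      rw [hmid]
      rw [show canPartitionA 0 a k = true from by simp [canPartitionA]]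
      rw [if_pos rfl, bsLoop]
      omega
    -- B's side: can_partition(1) already fails because 0 occurs fewer than k times
    have hP1 : canPartitionB 1 a k = false := by
      rw [canPartitionB, if_neg (by omega : ¬ ((1 : Int) = 0))]
      have hE : (PySem.Set.empty : PySem.Set Int).toFinset = (∅ : Finset Int) := rfl
      have hB := canB_char 1 k a 0 PySem.Set.empty (by simp [PySem.Set.empty]) (by omega)
      rw [hE] at hB
      have hle := GLoop_le_count 1 0 (by omega) (by omega) a ∅ (by simp)
      rw [if_neg (Finset.notMem_empty 0)] at hle
      cases hb : canPartitionLoopB 1 k a 0 PySem.Set.empty with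
      | false => rfl
      | true => have := hB.1 hb; omega
    have hBval : mexx_alt a k = 0 := by
      rw [mexx_alt, show a.length + 1 = a.length + 1 by rfl, scanLoop]
      rw [show (0 : Int) + 1 = 1 by ring, hP1]
      simp
    rw [hAval, hBval]
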